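-- pv_equiv track=rewrite | github.com/skymygo/coding_test | programmers/kakao/2020_kakao_blind/q2_bracket_change.py | solution
-- ===== SOURCE A (Python) =====
-- def solution(p):
--     brackets = list()
--     oc_list = [0,0]
--     bracket_list = ['(',')']
--     pos = 0
--     for bracket in p:
--         oc_list[bracket_list.index(bracket)] += 1
--         if oc_list[0] == oc_list[1]:
--             brackets.append(p[pos:sum(oc_list)])
--             pos = sum(oc_list)
--
--     answer = ''
--     end_list = list()
--     for bracket in brackets:
--         if bracket[0] == '(':
--             answer += bracket
--         else:
--             answer += '('
--             end_list.append(''.join(['(' if _ == ')' else ')' for _ in bracket[1:-1]]))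
--
--     for bracket in end_list[::-1]:
--         answer += ')' + bracket
--
--     return answer
-- ===== SOURCE B (Python) =====
-- def solution(p):
--     # Recursive: split off the shortest prefix with balanced counts, emit it
--     # (or its wrapped/flipped form) and recurse on the rest.
--     delta = {'(': 1, ')': -1}
--     u, bal, v = '', 0, p
--     while v:
--         ch, v = v[0], v[1:]
--         u += ch
--         bal += delta[ch]
--         if bal == 0:
--             if u[0] == '(':
--                 return u + solution(v)
--             return '(' + solution(v) + ')' + ''.join('(' if c == ')' else ')' for c in u[1:-1])
--     return ''
-- ===== Notes on version B (the rewrite author's own statement) =====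
-- stated objective: simpler
-- what changed: A makes three sequential passes building an explicit chunk list plus a reversed end_list stack; B is a short recursion that splits off the minimal equal-count prefix and emits the (possibly wrapped/flipped) piece directly, with no intermediate lists.
import Mathlib
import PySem

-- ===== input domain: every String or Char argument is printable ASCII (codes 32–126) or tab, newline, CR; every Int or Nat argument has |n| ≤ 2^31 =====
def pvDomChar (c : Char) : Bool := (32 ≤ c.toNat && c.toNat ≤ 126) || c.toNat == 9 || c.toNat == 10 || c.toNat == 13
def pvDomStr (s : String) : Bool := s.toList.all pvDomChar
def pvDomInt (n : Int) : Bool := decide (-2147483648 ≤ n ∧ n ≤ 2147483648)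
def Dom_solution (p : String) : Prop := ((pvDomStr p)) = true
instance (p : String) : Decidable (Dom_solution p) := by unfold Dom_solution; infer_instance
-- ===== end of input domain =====

-- B replaces A's three passes (chunk list + reversed end_list stack) by one direct recursion; objective: simpler.

-- ===== PORT A =====
-- ''.join(['(' if _ == ')' else ')' for _ in bracket[1:-1]])
def aFlip (b : List Char) : List Char :=
  (PySem.List.slice b (some 1) (some (-1))).map (fun ch => if ch = ')' then '(' else ')')

-- first for-loop of A: builds `brackets`; none = the ValueError of bracket_list.index (excluded by Pre_solution)
def aPhase1 (P : List Char) (rest : List Char) (o c : Int) (pos : Int)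
    (brackets : List (List Char)) : Option (List (List Char)) :=
  match rest with
  | [] => some brackets
  | ch :: t =>
    match PySem.List.index? ['(', ')'] ch with
    | none => none   -- bracket_list.index(bracket) raises ValueError here
    | some idx =>
      let o' := if idx = 0 then o + 1 else o
      let c' := if idx = 0 then c else c + 1
      if o' = c' then
        aPhase1 P t o' c' (o' + c') (brackets ++ [PySem.List.slice P (some pos) (some (o' + c'))])
      else aPhase1 P t o' c' pos brackets

-- second for-loop of A: builds `answer` and `end_list`; none = IndexError of bracket[0] (unreachable: chunks are nonempty)
def aPhase2 (brackets : List (List Char)) (answer : List Char) (endList : List (List Char)) :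
    Option (List Char × List (List Char)) :=
  match brackets with
  | [] => some (answer, endList)
  | b :: rest =>
    match PySem.List.pyGet? b 0 with
    | none => none
    | some ch =>
      if ch = '(' then aPhase2 rest (answer ++ b) endList
      else aPhase2 rest (answer ++ ['(']) (endList ++ [aFlip b])

-- third for-loop of A over end_list[::-1]
def aPhase3 (endRev : List (List Char)) (answer : List Char) : List Char :=
  match endRev with
  | [] => answer
  | b :: rest => aPhase3 rest (answer ++ ')' :: b)

def solution (p : String) : String :=
  match aPhase1 p.toList p.toList 0 0 0 [] with
  | none => ""   -- ValueError; excluded by Pre_solution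
  | some brackets =>
    match aPhase2 brackets [] [] with
    | none => ""   -- IndexError: unreachable (chunks are nonempty)
    | some (answer, endList) =>
      match PySem.List.slice? endList none none (-1) with
      | none => ""   -- unreachable: step -1 ≠ 0
      | some rev => String.ofList (aPhase3 rev answer)

-- ===== PORT B =====
-- ''.join('(' if c == ')' else ')' for c in u[1:-1])
def bFlip (u : List Char) : List Char :=
  (PySem.List.slice u (some 1) (some (-1))).map (fun ch => if ch = ')' then '(' else ')')

-- delta[ch] of B's dict: none = the KeyError of a non-bracket character (excluded by Pre_solution)
def bDelta (ch : Char) : Option Int :=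
  if ch = '(' then some 1 else if ch = ')' then some (-1) else none

-- B's while loop up to its `bal == 0` exit: some (u, v) at the exit; none if the loop
-- runs off the string or delta[ch] raises KeyError (the KeyError case is excluded by Pre_solution)
def bSplit (u : List Char) (bal : Int) (v : List Char) : Option (List Char × List Char) :=
  match v with
  | [] => none
  | ch :: t =>
    match bDelta ch with
    | none => none
    | some d =>
      if bal + d = 0 then some (u ++ [ch], t)
      else bSplit (u ++ [ch]) (bal + d) t

-- needed by bGo's termination: the remainder handed to the recursive call is shorter
theorem bSplit_length_lt : ∀ (v u : List Char) (bal : Int) (c r : List Char),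
    bSplit u bal v = some (c, r) → r.length < v.length := by
  intro v
  induction v with
  | nil => intro u bal c r h; simp [bSplit] at h
  | cons ch t ih =>
    intro u bal c r h
    simp only [bSplit] at h
    split at h
    · exact absurd h (by simp)
    · split at h <;>
        first
          | (injection h with h2; cases h2; simp)
          | exact Nat.lt_trans (ih _ _ _ _ h) (by simp)

def bGo (chars : List Char) : List Char :=
  match h : bSplit [] 0 chars with
  | none => []
  | some (u, v) =>
    -- u[0] == '(' : u is nonempty here, so Python's u[0] cannot raise
    if PySem.List.pyGet? u 0 = some '(' then u ++ bGo v
    else '(' :: (bGo v ++ ')' :: bFlip u)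
termination_by chars.length
decreasing_by all_goals exact bSplit_length_lt chars [] 0 u v h

def solution_alt (p : String) : String := String.ofList (bGo p.toList)

-- ===== PRECONDITION & SPEC =====
-- Pre_ excludes exactly the inputs containing a character other than '(' / ')', on which A raises ValueError.
def Pre_solution (p : String) : Prop := ∀ ch ∈ p.toList, ch = '(' ∨ ch = ')'
instance (p : String) : Decidable (Pre_solution p) := by unfold Pre_solution; exact List.decidableBAll _ _
def pvWitness_solution : String := "(())"

def Spec_solution (p : String) (out : String) : Prop := out = solution_alt p
instance (p : String) (out : String) : Decidable (Spec_solution p out) := by unfold Spec_solution; infer_instance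

-- ===== CLAIM (what is proved, stated in full; the proofs are below) =====
def Claim_equal_solution : Prop := ∀ (p : String), Dom_solution p → Pre_solution p → Spec_solution p (solution p)

-- ===== LEMMAS AND PROOFS =====

-- chunk decomposition induced by bSplit (proof-side device shared by both directions)
def chunksFrom (u : List Char) (bal : Int) (v : List Char) : List (List Char) :=
  match h : bSplit u bal v with
  | none => []
  | some (c, r) => c :: chunksFrom [] 0 r
termination_by v.length
decreasing_by exact bSplit_length_lt v u bal c r h

theorem chunksFrom_unfold (u : List Char) (bal : Int) (v : List Char) :
    chunksFrom u bal v = match bSplit u bal v with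
      | none => []
      | some (c, r) => c :: chunksFrom [] 0 r := by
  cases hs : bSplit u bal v with
  | none => rw [chunksFrom, hs]
  | some pr => rw [chunksFrom, hs]

theorem bGo_unfold (chars : List Char) :
    bGo chars = match bSplit [] 0 chars with
      | none => []
      | some (u, v) =>
        if PySem.List.pyGet? u 0 = some '(' then u ++ bGo v
        else '(' :: (bGo v ++ ')' :: bFlip u) := by
  cases hs : bSplit [] 0 chars with
  | none => rw [bGo, hs]
  | some pr => rw [bGo, hs]

theorem chunksFrom_step (u : List Char) (bal : Int) (ch : Char) (t : List Char)
    (hch : ch = '(' ∨ ch = ')')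
    (h : bal + (if ch = '(' then 1 else -1) ≠ 0) :
    chunksFrom u bal (ch :: t) = chunksFrom (u ++ [ch]) (bal + (if ch = '(' then 1 else -1)) t := by
  rw [chunksFrom_unfold, chunksFrom_unfold]
  have hs : bSplit u bal (ch :: t) = bSplit (u ++ [ch]) (bal + (if ch = '(' then 1 else -1)) t := by
    rcases hch with rfl | rfl
    · have h' : bal + 1 ≠ 0 := by simpa using h
      simp [bSplit, bDelta, h']
    · have h' : bal + -1 ≠ 0 := by simpa using h
      simp [bSplit, bDelta, h']
  rw [hs]

theorem chunksFrom_cut (u : List Char) (bal : Int) (ch : Char) (t : List Char)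
    (hch : ch = '(' ∨ ch = ')')
    (h : bal + (if ch = '(' then 1 else -1) = 0) :
    chunksFrom u bal (ch :: t) = (u ++ [ch]) :: chunksFrom [] 0 t := by
  rw [chunksFrom_unfold]
  have hs : bSplit u bal (ch :: t) = some (u ++ [ch], t) := by
    rcases hch with rfl | rfl
    · have h' : bal + 1 = 0 := by simpa using h
      simp [bSplit, bDelta, h']
    · have h' : bal + -1 = 0 := by simpa using h
      simp [bSplit, bDelta, h']
  rw [hs]

theorem bSplit_fst_ne_nil : ∀ (v u : List Char) (bal : Int) (c r : List Char),
    bSplit u bal v = some (c, r) → c ≠ [] := by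
  intro v
  induction v with
  | nil => intro u bal c r h; simp [bSplit] at h
  | cons ch t ih =>
    intro u bal c r h
    simp only [bSplit] at h
    split at h
    · exact absurd h (by simp)
    · split at h <;>
        first
          | (injection h with h2; cases h2; simp)
          | exact ih _ _ _ _ h

theorem chunks_ne_nil : ∀ (n : Nat) (v u : List Char) (bal : Int), v.length ≤ n →
    ∀ b ∈ chunksFrom u bal v, b ≠ [] := by
  intro n
  induction n with
  | zero =>
    intro v u bal hv b hb
    have hv0 : v = [] := List.length_eq_zero_iff.mp (Nat.le_zero.mp hv)
    subst hv0
    rw [chunksFrom_unfold] at hb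
    simp [bSplit] at hb
  | succ n ih =>
    intro v u bal hv b hb
    rw [chunksFrom_unfold] at hb
    cases hs : bSplit u bal v with
    | none => rw [hs] at hb; simp at hb
    | some pr =>
      obtain ⟨c, r⟩ := pr
      rw [hs] at hb
      simp only [List.mem_cons] at hb
      rcases hb with rfl | hb
      · exact bSplit_fst_ne_nil v u bal b r hs
      · exact ih r [] 0 (by have := bSplit_length_lt v u bal c r hs; omega) b hb

-- answer / end_list contributions of A's second loop, as functions of the chunk list
def ansOf : List (List Char) → List Char
  | [] => []
  | b :: r => (if PySem.List.pyGet? b 0 = some '(' then b else ['(']) ++ ansOf r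

def elOf : List (List Char) → List (List Char)
  | [] => []
  | b :: r => (if PySem.List.pyGet? b 0 = some '(' then [] else [aFlip b]) ++ elOf r

theorem aPhase2_eq : ∀ (cs : List (List Char)) (ans : List Char) (el : List (List Char)),
    (∀ b ∈ cs, b ≠ []) → aPhase2 cs ans el = some (ans ++ ansOf cs, el ++ elOf cs) := by
  intro cs
  induction cs with
  | nil => intro ans el _; simp [aPhase2, ansOf, elOf]
  | cons b r ih =>
    intro ans el hne
    have hb : b ≠ [] := hne b (by simp)
    obtain ⟨x, b', rfl⟩ : ∃ x b', b = x :: b' := by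
      cases b with
      | nil => exact absurd rfl hb
      | cons x b' => exact ⟨x, b', rfl⟩
    have hr : ∀ b ∈ r, b ≠ [] := fun b hb' => hne b (List.mem_cons_of_mem _ hb')
    simp only [aPhase2, PySem.List.pyGet?_zero_cons]
    by_cases hx : x = '('
    · rw [if_pos hx, ih _ _ hr]
      simp [ansOf, elOf, hx, List.append_assoc]
    · rw [if_neg hx, ih _ _ hr]
      simp [ansOf, elOf, hx, List.append_assoc]

theorem aPhase3_eq : ∀ (l : List (List Char)) (ans : List Char),
    aPhase3 l ans = ans ++ l.flatMap (fun b => ')' :: b) := by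
  intro l
  induction l with
  | nil => intro ans; simp [aPhase3]
  | cons b r ih => intro ans; simp [aPhase3, ih]

-- A's final answer as a function of the chunk list
def G (cs : List (List Char)) : List Char :=
  ansOf cs ++ ((elOf cs).reverse).flatMap (fun b => ')' :: b)

theorem G_cons (b : List Char) (cs : List (List Char)) :
    G (b :: cs) = if PySem.List.pyGet? b 0 = some '(' then b ++ G cs
      else '(' :: (G cs ++ ')' :: aFlip b) := by
  by_cases hb : PySem.List.pyGet? b 0 = some '('
  · simp [G, ansOf, elOf, hb, List.append_assoc]
  · simp [G, ansOf, elOf, hb, List.flatMap_append, List.append_assoc]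

theorem bGo_eq_G : ∀ (n : Nat) (l : List Char), l.length ≤ n → bGo l = G (chunksFrom [] 0 l) := by
  intro n
  induction n with
  | zero =>
    intro l hl
    have hl0 : l = [] := List.length_eq_zero_iff.mp (Nat.le_zero.mp hl)
    subst hl0
    rw [bGo_unfold, chunksFrom_unfold]
    simp [bSplit, G, ansOf, elOf]
  | succ n ih =>
    intro l hl
    rw [bGo_unfold, chunksFrom_unfold]
    cases hs : bSplit [] 0 l with
    | none => simp [G, ansOf, elOf]
    | some pr =>
      obtain ⟨u, v⟩ := pr
      have hv := bSplit_length_lt l [] 0 u v hs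
      show (if PySem.List.pyGet? u 0 = some '(' then u ++ bGo v
        else '(' :: (bGo v ++ ')' :: bFlip u)) = G (u :: chunksFrom [] 0 v)
      rw [G_cons, ih v (by omega)]
      have hflip : bFlip u = aFlip u := rfl
      rw [hflip]

-- invariant of A's first loop: it computes the chunk decomposition
theorem aPhase1_eq : ∀ (rest P d u : List Char) (o c : Int) (k : Nat) (brackets : List (List Char)),
    (∀ ch ∈ rest, ch = '(' ∨ ch = ')') →
    P = d ++ rest →
    o + c = (d.length : Int) →
    k ≤ d.length →
    u = d.drop k →
    aPhase1 P rest o c (k : Int) brackets = some (brackets ++ chunksFrom u (o - c) rest) := by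
  intro rest
  induction rest with
  | nil =>
    intro P d u o c k brackets _ _ _ _ _
    rw [chunksFrom_unfold]
    simp [aPhase1, bSplit]
  | cons ch t ih =>
    intro P d u o c k brackets hall hP hoc hk hu
    have hall' : ∀ c' ∈ t, c' = '(' ∨ c' = ')' := fun c' hc' => hall c' (by simp [hc'])
    have hulen : u.length = d.length - k := by subst hu; simp
    have hdropP : P.drop k = u ++ ch :: t := by
      rw [hP, List.drop_append_of_le_length hk, hu]
    have hslice : PySem.List.slice P (some (k : Int)) (some ((d.length + 1 : Nat) : Int)) = u ++ [ch] := by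
      rw [PySem.List.slice_natCast, hdropP, List.take_append]
      have h1 : u.take (d.length + 1 - k) = u := List.take_of_length_le (by omega)
      rw [h1]
      have h2 : d.length + 1 - k - u.length = 1 := by omega
      rw [h2]
      rfl
    rcases hall ch (by simp) with hch | hch <;> subst hch
    · -- ch = '('
      have hidx : PySem.List.index? ['(', ')'] '(' = some 0 := by decide
      simp only [aPhase1, hidx, reduceIte]
      by_cases heq : o + 1 = c
      · rw [if_pos heq]
        have hlen : o + 1 + c = ((d.length + 1 : Nat) : Int) := by push_cast; omega
        rw [hlen, hslice]
        rw [ih P (d ++ ['(']) [] (o + 1) c (d.length + 1) (brackets ++ [u ++ ['(']])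
          hall' (by rw [hP]; simp) (by simp only [List.length_append, List.length_cons, List.length_nil]; push_cast; omega) (by simp) (by simp)]
        rw [chunksFrom_cut u (o - c) '(' t (Or.inl rfl) (by simp; omega)]
        have h0 : o + 1 - c = 0 := by omega
        rw [h0]
        simp [List.append_assoc]
      · rw [if_neg heq]
        have step : chunksFrom u (o - c) ('(' :: t) = chunksFrom (u ++ ['(']) (o + 1 - c) t := by
          have := chunksFrom_step u (o - c) '(' t (Or.inl rfl) (by simp; omega)
          have harith : o - c + 1 = o + 1 - c := by omega
          simpa [harith] using this
        rw [step]
        exact ih P (d ++ ['(']) (u ++ ['(']) (o + 1) c k brackets hall'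
          (by rw [hP]; simp) (by simp only [List.length_append, List.length_cons, List.length_nil]; push_cast; omega) (by simp; omega)
          (by rw [List.drop_append_of_le_length hk, hu])
    · -- ch = ')'
      have hidx : PySem.List.index? ['(', ')'] ')' = some 1 := by decide
      simp only [aPhase1, hidx, Nat.one_ne_zero, reduceIte]
      by_cases heq : o = c + 1
      · rw [if_pos heq]
        have hlen : o + (c + 1) = ((d.length + 1 : Nat) : Int) := by push_cast; omega
        rw [hlen, hslice]
        rw [ih P (d ++ [')']) [] o (c + 1) (d.length + 1) (brackets ++ [u ++ [')']])
          hall' (by rw [hP]; simp) (by simp only [List.length_append, List.length_cons, List.length_nil]; push_cast; omega) (by simp) (by simp)]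
        rw [chunksFrom_cut u (o - c) ')' t (Or.inr rfl) (by simp; omega)]
        have h0 : o - (c + 1) = 0 := by omega
        rw [h0]
        simp [List.append_assoc]
      · rw [if_neg heq]
        have step : chunksFrom u (o - c) (')' :: t) = chunksFrom (u ++ [')']) (o - (c + 1)) t := by
          have := chunksFrom_step u (o - c) ')' t (Or.inr rfl) (by simp; omega)
          have harith : o - c + -1 = o - (c + 1) := by omega
          simpa [harith] using this
        rw [step]
        exact ih P (d ++ [')']) (u ++ [')']) o (c + 1) k brackets hall'
          (by rw [hP]; simp) (by simp only [List.length_append, List.length_cons, List.length_nil]; push_cast; omega) (by simp; omega)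
          (by rw [List.drop_append_of_le_length hk, hu])

-- ===== VERDICT (by name: the statement is the Claim_ definition above) =====
theorem solution_spec : Claim_equal_solution := by
  intro p _ hpre
  show solution p = solution_alt p
  have h1 : aPhase1 p.toList p.toList 0 0 ((0 : Nat) : Int) [] =
      some ([] ++ chunksFrom [] (0 - 0) p.toList) :=
    aPhase1_eq p.toList p.toList [] [] 0 0 0 [] hpre rfl (by simp) (by simp) (by simp)
  simp only [Nat.cast_zero, sub_zero, List.nil_append] at h1
  have hne : ∀ b ∈ chunksFrom [] 0 p.toList, b ≠ [] :=
    chunks_ne_nil p.toList.length p.toList [] 0 (le_refl _)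
  have h2 := aPhase2_eq (chunksFrom [] 0 p.toList) [] [] hne
  simp only [List.nil_append] at h2
  have h3 := PySem.List.slice?_none_none_neg_one (xs := elOf (chunksFrom [] 0 p.toList))
  have h4 := aPhase3_eq ((elOf (chunksFrom [] 0 p.toList)).reverse) (ansOf (chunksFrom [] 0 p.toList))
  have h5 := bGo_eq_G p.toList.length p.toList (le_refl _)
  simp only [solution, solution_alt, h1, h2, h3, h4, h5, G]
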